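-- pv_equiv track=rewrite | github.com/NathanThai2201/CopeTalk | CopeTalk.py | fibonacci_swap
-- ===== SOURCE A (Python) =====
-- def fibonacci_swap(t_input):
--     fib = [0,1]
--     i=2
--     while fib[i-1]<len(t_input):
--         fib.append(fib[i-1]+ fib[i-2])
--         index1 = fib[i]
--         i+=1
--         fib.append(fib[i-1]+ fib[i-2])
--         index2 = fib[i]
--         i+=1
--         if index1 < len(t_input) and index2 < len(t_input):
--             temp =t_input[index1]
--             t_input[index1] = t_input[index2]
--             t_input[index2] = temp
--     return t_input
-- ===== SOURCE B (Python) =====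
-- def fibonacci_swap(t_input):
--     n = len(t_input)
--     target = {}
--     a, b = 1, 2
--     while b < n:
--         target[a] = b
--         target[b] = a
--         a, b = a + b, a + 2 * b
--     t_input[:] = [t_input[target.get(p, p)] for p in range(n)]
--     return t_input
-- ===== Notes on version B (the rewrite author's own statement) =====
-- stated objective: alternative
-- what changed: A walks a growing Fibonacci list and destructively swaps t_input's entries pair by pair inside the generation loop; B never swaps: it records each Fibonacci pair (a,b) as a permutation dict target[a]=b, target[b]=a using only two scalars, then rebuilds the whole list in one comprehension t[target.get(p,p)].
import Mathlib
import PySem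

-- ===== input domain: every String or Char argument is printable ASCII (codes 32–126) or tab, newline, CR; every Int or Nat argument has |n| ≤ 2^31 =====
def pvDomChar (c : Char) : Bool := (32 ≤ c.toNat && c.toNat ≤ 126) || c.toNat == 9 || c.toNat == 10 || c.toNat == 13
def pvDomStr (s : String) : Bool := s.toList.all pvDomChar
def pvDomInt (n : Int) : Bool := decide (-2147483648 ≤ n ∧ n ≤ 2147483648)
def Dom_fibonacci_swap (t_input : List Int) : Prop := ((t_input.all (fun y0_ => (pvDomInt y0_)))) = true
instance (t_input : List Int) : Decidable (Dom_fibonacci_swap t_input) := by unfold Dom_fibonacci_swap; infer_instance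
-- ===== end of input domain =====

-- B replaces A's destructive loop (generate Fibonacci numbers into a growing list, swapping
-- entries of t_input in place pair by pair) by a permutation map: it records each swapped pair
-- (a,b) as target[a]=b, target[b]=a in a dict and then rebuilds the list in one comprehension
-- t[target.get(p,p)]; objective: alternative.  Both Pythons mutate the argument list in place
-- and return it; the equivalence proved here is about the returned value (which is that list).

-- ===== PORT A =====
-- the in-place swap t[i1],t[i2] via temp; indices are always in range when used, so getD is exact
def swapAt (t : List Int) (i j : Nat) : List Int :=
  (t.set i (t.getD j 0)).set j (t.getD i 0)

-- A's while loop; state = (t_input, fib, i) exactly as in the Python.  Python list indices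
-- fib[i-1], fib[i-2], fib[i] are always in range (i = len(fib) at loop entry), so getD is exact.
-- The fuel t.length + 2 strictly exceeds the number of iterations (the guard value fib[i-1]
-- increases by at least 1 every iteration).
def loopA (t : List Int) (fib : List Nat) (i : Nat) (fuel : Nat) : List Int :=
  match fuel with
  | 0 => t
  | f+1 =>
    if fib.getD (i-1) 0 < t.length then
      let fib1 := fib ++ [fib.getD (i-1) 0 + fib.getD (i-2) 0]
      let index1 := fib1.getD i 0
      let fib2 := fib1 ++ [fib1.getD ((i+1)-1) 0 + fib1.getD ((i+1)-2) 0]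
      let index2 := fib2.getD (i+1) 0
      let t' := if index1 < t.length ∧ index2 < t.length then swapAt t index1 index2 else t
      loopA t' fib2 (i+2) f
    else t

def fibonacci_swap (t_input : List Int) : List Int :=
  loopA t_input [0, 1] 2 (t_input.length + 2)

-- ===== PORT B =====
-- Source B's while loop: while b < n: target[a]=b; target[b]=a; a,b = a+b, a+2*b.
-- Dict keys are the (nonnegative) swap indices, so Nat keys are exact.  The fuel n + 2
-- strictly exceeds the number of iterations (b increases by at least 3 every iteration).
def buildTarget (n : Nat) (a b : Nat) (d : PySem.Dict Nat Nat) (fuel : Nat) : PySem.Dict Nat Nat :=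
  match fuel with
  | 0 => d
  | f+1 =>
    if b < n then buildTarget n (a + b) (a + 2 * b) ((d.insert a b).insert b a) f else d

-- Source B's comprehension [t_input[target.get(p, p)] for p in range(n)]; the looked-up index is
-- always < n = t.length, so getD 0 is exact
def fibonacci_swap_alt (t_input : List Int) : List Int :=
  let n := t_input.length
  let target := buildTarget n 1 2 PySem.Dict.empty (n + 2)
  (List.range n).map (fun p => t_input.getD (target.getD p p) 0)

-- ===== PRECONDITION & SPEC =====
def Spec_fibonacci_swap (t_input : List Int) (out : List Int) : Prop := out = fibonacci_swap_alt t_input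
instance (t_input : List Int) (out : List Int) : Decidable (Spec_fibonacci_swap t_input out) := by unfold Spec_fibonacci_swap; infer_instance

-- ===== CLAIM (what is proved, stated in full; the proofs are below) =====
def Claim_equal_fibonacci_swap : Prop := ∀ (t_input : List Int), Dom_fibonacci_swap t_input → Spec_fibonacci_swap t_input (fibonacci_swap t_input)

-- ===== LEMMAS AND PROOFS =====

-- common abstraction of A's loop: the swap pair as two scalars (a,b) = (fib[i-2], fib[i-1])
def core (n : Nat) (t : List Int) (a b : Nat) (fuel : Nat) : List Int :=
  match fuel with
  | 0 => t
  | f+1 =>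
    if b < n then
      let i1 := b + a
      let i2 := i1 + b
      let t' := if i1 < n ∧ i2 < n then swapAt t i1 i2 else t
      core n t' i1 i2 f
    else t

-- the list of pairs both programs swap: successive (F_{2k}, F_{2k+1}) with second component < n
def pairsB (n : Nat) (a b : Nat) (fuel : Nat) : List (Nat × Nat) :=
  match fuel with
  | 0 => []
  | f+1 => if b < n then (a, b) :: pairsB n (a + b) (a + 2 * b) f else []

def applySwaps (t : List Int) (L : List (Nat × Nat)) : List Int :=
  L.foldl (fun t p => swapAt t p.1 p.2) t

def lookupP : List (Nat × Nat) → Nat → Nat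
  | [], p => p
  | (a, b) :: r, p => if p = a then b else if p = b then a else lookupP r p

-- all pair components strictly increase along the list and stay above m
def Inc : Nat → List (Nat × Nat) → Prop
  | _, [] => True
  | m, (a, b) :: r => m < a ∧ a < b ∧ Inc b r

def insPair (d : PySem.Dict Nat Nat) (p : Nat × Nat) : PySem.Dict Nat Nat :=
  (d.insert p.1 p.2).insert p.2 p.1

theorem length_swapAt (t : List Int) (i j : Nat) : (swapAt t i j).length = t.length := by
  simp [swapAt]

theorem getD_snoc_lt (l : List Nat) (x : Nat) (k : Nat) (h : k < l.length) :
    (l ++ [x]).getD k 0 = l.getD k 0 := by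
  simp [List.getD, List.getElem?_append_left h]

theorem getD_snoc_eq (l : List Nat) (x : Nat) : (l ++ [x]).getD l.length 0 = x := by
  simp [List.getD]

theorem core_stop (n : Nat) (t : List Int) (a b : Nat) (f : Nat) (h : n ≤ b) :
    core n t a b f = t := by
  cases f <;> simp [core, Nat.not_lt_of_le h]

theorem loopA_eq_core (f : Nat) : ∀ (t : List Int) (fib : List Nat) (i : Nat),
    2 ≤ i → i = fib.length →
    loopA t fib i f = core t.length t (fib.getD (i-2) 0) (fib.getD (i-1) 0) f := by
  induction f with
  | zero => intro t fib i _ _; rfl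
  | succ f ih =>
    intro t fib i h2 hlen
    have hi1 : i - 1 < fib.length := by omega
    have hi2 : i - 2 < fib.length := by omega
    simp only [loopA, core]
    by_cases hg : fib.getD (i-1) 0 < t.length
    · rw [if_pos hg, if_pos hg]
      have h11 : i + 1 - 1 = i := by omega
      have h12 : i + 1 - 2 = i - 1 := by omega
      rw [h11, h12]
      set v := fib.getD (i-1) 0 + fib.getD (i-2) 0 with hv
      have e1 : (fib ++ [v]).getD i 0 = v := by rw [hlen]; exact getD_snoc_eq _ _
      have e1' : (fib ++ [v]).getD (i-1) 0 = fib.getD (i-1) 0 :=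
        getD_snoc_lt _ _ _ (by omega)
      rw [e1, e1']
      set w := v + fib.getD (i-1) 0 with hw
      have hlen1 : (fib ++ [v]).length = i + 1 := by simp [hlen]
      have e2 : ((fib ++ [v]) ++ [w]).getD (i+1) 0 = w := by
        rw [← hlen1]; exact getD_snoc_eq _ _
      rw [e2]
      rw [ih _ _ _ (by omega) (by simp [hlen])]
      have e3 : ((fib ++ [v]) ++ [w]).getD (i+2-2) 0 = v := by
        rw [show i+2-2 = i from by omega,
          getD_snoc_lt _ _ _ (by rw [hlen1]; omega), e1]
      have e4 : ((fib ++ [v]) ++ [w]).getD (i+2-1) 0 = w := by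
        rw [show i+2-1 = i+1 from by omega]; exact e2
      rw [e3, e4]
      have hlt : (if v < t.length ∧ w < t.length then swapAt t v w else t).length
          = t.length := by split_ifs <;> simp [length_swapAt]
      rw [hlt]
    · rw [if_neg hg, if_neg hg]

theorem core_eq_pairs (n : Nat) (f : Nat) : ∀ (t : List Int) (a b : Nat),
    core n t a b f = applySwaps t (pairsB n (a + b) (a + 2 * b) f) := by
  induction f with
  | zero => intro t a b; rfl
  | succ f ih =>
    intro t a b
    simp only [core, pairsB]
    by_cases hg : b < n
    · rw [if_pos hg]
      by_cases h2 : a + 2 * b < n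
      · rw [if_pos h2, if_pos (by omega : b + a < n ∧ b + a + b < n)]
        rw [show b + a = a + b from by omega, show a + b + b = a + 2 * b from by omega]
        rw [ih (swapAt t (a + b) (a + 2 * b)) (a + b) (a + 2 * b)]
        rfl
      · rw [if_neg h2, if_neg (by omega : ¬(b + a < n ∧ b + a + b < n))]
        rw [show b + a = a + b from by omega, show a + b + b = a + 2 * b from by omega]
        rw [core_stop n t _ _ f (by omega)]
        rfl
    · rw [if_neg hg, if_neg (by omega : ¬ a + 2 * b < n)]
      rfl

theorem buildTarget_eq (n : Nat) (f : Nat) : ∀ (a b : Nat) (d : PySem.Dict Nat Nat),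
    buildTarget n a b d f = (pairsB n a b f).foldl insPair d := by
  induction f with
  | zero => intro a b d; rfl
  | succ f ih =>
    intro a b d
    simp only [buildTarget, pairsB]
    by_cases hg : b < n
    · rw [if_pos hg, if_pos hg, ih]; rfl
    · rw [if_neg hg, if_neg hg]; rfl

theorem Inc_pairsB (n : Nat) (f : Nat) : ∀ (a b m : Nat), m < a → a < b →
    Inc m (pairsB n a b f) := by
  induction f with
  | zero => intro a b m _ _; trivial
  | succ f ih =>
    intro a b m hma hab
    simp only [pairsB]
    by_cases hg : b < n
    · rw [if_pos hg]
      exact ⟨hma, hab, ih (a + b) (a + 2 * b) b (by omega) (by omega)⟩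
    · rw [if_neg hg]; trivial

theorem bound_pairsB (n : Nat) (f : Nat) : ∀ (a b : Nat), a < b →
    ∀ p ∈ pairsB n a b f, p.1 < n ∧ p.2 < n := by
  induction f with
  | zero => intro a b _ p hp; simp [pairsB] at hp
  | succ f ih =>
    intro a b hab p hp
    simp only [pairsB] at hp
    by_cases hg : b < n
    · rw [if_pos hg] at hp
      rcases List.mem_cons.mp hp with h | h
      · subst h; exact ⟨by omega, hg⟩
      · exact ih (a + b) (a + 2 * b) (by omega) p h
    · rw [if_neg hg] at hp; simp at hp

theorem Inc_gt : ∀ (L : List (Nat × Nat)) (m : Nat), Inc m L →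
    ∀ p ∈ L, m < p.1 ∧ m < p.2 := by
  intro L
  induction L with
  | nil => intro m _ p hp; simp at hp
  | cons q r ih =>
    intro m hI p hp
    obtain ⟨a, b⟩ := q
    obtain ⟨h1, h2, h3⟩ := hI
    rcases List.mem_cons.mp hp with h | h
    · subst h; exact ⟨h1, by omega⟩
    · have := ih b h3 p h
      omega

theorem lookupP_not_mem : ∀ (L : List (Nat × Nat)) (q : Nat),
    (∀ p ∈ L, q ≠ p.1 ∧ q ≠ p.2) → lookupP L q = q := by
  intro L
  induction L with
  | nil => intro q _; rfl
  | cons p r ih =>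
    intro q h
    obtain ⟨a, b⟩ := p
    have h0 := h (a, b) List.mem_cons_self
    simp only [lookupP, if_neg h0.1, if_neg h0.2]
    exact ih q (fun p hp => h p (List.mem_cons_of_mem _ hp))

theorem lookupP_cases : ∀ (L : List (Nat × Nat)) (q : Nat),
    lookupP L q = q ∨ ∃ p ∈ L, lookupP L q = p.1 ∨ lookupP L q = p.2 := by
  intro L
  induction L with
  | nil => intro q; left; rfl
  | cons p r ih =>
    intro q
    obtain ⟨a, b⟩ := p
    simp only [lookupP]
    by_cases h1 : q = a
    · right; exact ⟨(a, b), List.mem_cons_self, by simp [h1]⟩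
    · by_cases h2 : q = b
      · right; exact ⟨(a, b), List.mem_cons_self, by simp [h1, h2]⟩
      · rw [if_neg h1, if_neg h2]
        rcases ih q with h | ⟨p, hp, h⟩
        · left; exact h
        · right; exact ⟨p, List.mem_cons_of_mem _ hp, h⟩

theorem foldl_ins_not_mem : ∀ (L : List (Nat × Nat)) (d : PySem.Dict Nat Nat) (q : Nat),
    (∀ p ∈ L, q ≠ p.1 ∧ q ≠ p.2) → (L.foldl insPair d).getD q q = d.getD q q := by
  intro L
  induction L with
  | nil => intro d q _; rfl
  | cons p r ih =>
    intro d q h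
    obtain ⟨a, b⟩ := p
    have h0 := h (a, b) List.mem_cons_self
    simp only [List.foldl_cons]
    rw [ih _ q (fun p hp => h p (List.mem_cons_of_mem _ hp))]
    simp only [insPair, PySem.Dict.getD_insert]
    rw [if_neg h0.2, if_neg h0.1]

theorem foldl_ins_getD : ∀ (L : List (Nat × Nat)) (m : Nat) (d : PySem.Dict Nat Nat) (q : Nat),
    Inc m L → ¬ (∀ p ∈ L, q ≠ p.1 ∧ q ≠ p.2) →
    (L.foldl insPair d).getD q q = lookupP L q := by
  intro L
  induction L with
  | nil => intro m d q _ h; exact absurd (by simp) h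
  | cons p r ih =>
    intro m d q hI h
    obtain ⟨a, b⟩ := p
    obtain ⟨h1, h2, h3⟩ := hI
    simp only [List.foldl_cons]
    by_cases hr : ∀ p ∈ r, q ≠ p.1 ∧ q ≠ p.2
    · -- q occurs only in the head pair
      have hq : q = a ∨ q = b := by
        by_contra hc
        push_neg at hc
        exact h (fun p hp => by
          rcases List.mem_cons.mp hp with he | he
          · subst he; exact hc
          · exact hr p he)
      rw [foldl_ins_not_mem r _ q hr]
      simp only [insPair, PySem.Dict.getD_insert, lookupP]
      rcases hq with hq | hq
      · subst hq
        rw [if_neg (by omega : ¬ q = b), if_pos rfl, if_pos rfl]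
      · subst hq
        rw [if_pos rfl, if_neg (by omega : ¬ q = a), if_pos rfl]
    · -- q occurs in r, hence q > b and q ∉ {a, b}
      push_neg at hr
      obtain ⟨p0, hp0, hocc⟩ := hr
      have hgt := Inc_gt r b h3 p0 hp0
      have hq : b < q := by rcases Classical.em (q = p0.1) with h' | h'
                            · omega
                            · have := hocc h'; omega
      simp only [lookupP]
      rw [if_neg (by omega : ¬ q = a), if_neg (by omega : ¬ q = b)]
      exact ih b _ q h3 (by
        intro hall
        have := hall p0 hp0
        rcases Classical.em (q = p0.1) with h' | h'
        · exact this.1 h'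
        · exact this.2 (hocc h'))

theorem dict_lookup (L : List (Nat × Nat)) (m : Nat) (q : Nat) (hI : Inc m L) :
    (L.foldl insPair PySem.Dict.empty).getD q q = lookupP L q := by
  by_cases h : ∀ p ∈ L, q ≠ p.1 ∧ q ≠ p.2
  · rw [foldl_ins_not_mem L _ q h, lookupP_not_mem L q h]
    rfl
  · exact foldl_ins_getD L m _ q hI h

theorem map_getD_range (t : List Int) :
    (List.range t.length).map (fun p => t.getD p 0) = t := by
  apply List.ext_getElem
  · simp
  · intro i h1 h2
    simp [List.getD_eq_getElem?_getD, List.getElem?_eq_getElem h2]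

theorem getD_swapAt_fst (t : List Int) (a b : Nat) (ha : a < t.length) (hab : a ≠ b) :
    (swapAt t a b).getD a 0 = t.getD b 0 := by
  simp [swapAt, List.getD_eq_getElem?_getD, List.getElem?_set_ne (fun h => hab h.symm),
    List.getElem?_set_self' , List.getElem?_eq_getElem ha]

theorem getD_swapAt_snd (t : List Int) (a b : Nat) (hb : b < t.length) :
    (swapAt t a b).getD b 0 = t.getD a 0 := by
  simp [swapAt, List.getD_eq_getElem?_getD, List.getElem?_set_self', hb,
    List.getElem?_eq_getElem hb]

theorem getD_swapAt_other (t : List Int) (a b q : Nat) (h1 : q ≠ a) (h2 : q ≠ b) :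
    (swapAt t a b).getD q 0 = t.getD q 0 := by
  simp [swapAt, List.getD_eq_getElem?_getD,
    List.getElem?_set_ne (fun h => h2 h.symm), List.getElem?_set_ne (fun h => h1 h.symm)]

theorem applySwaps_eq_map : ∀ (L : List (Nat × Nat)) (t : List Int) (m : Nat),
    Inc m L → (∀ p ∈ L, p.1 < t.length ∧ p.2 < t.length) →
    applySwaps t L = (List.range t.length).map (fun p => t.getD (lookupP L p) 0) := by
  intro L
  induction L with
  | nil =>
    intro t m _ _
    simp only [applySwaps, List.foldl_nil, lookupP]
    exact (map_getD_range t).symm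
  | cons pr r ih =>
    intro t m hI hB
    obtain ⟨a, b⟩ := pr
    obtain ⟨h1, h2, h3⟩ := hI
    have hBa := hB (a, b) List.mem_cons_self
    have hlen : (swapAt t a b).length = t.length := length_swapAt t a b
    have hrec : applySwaps t ((a, b) :: r) = applySwaps (swapAt t a b) r := rfl
    rw [hrec, ih (swapAt t a b) b h3 (fun p hp => by
      rw [hlen]; exact hB p (List.mem_cons_of_mem _ hp)), hlen]
    apply List.map_congr_left
    intro p _
    have hgt := Inc_gt r b h3
    by_cases hpa : p = a
    · have hl : lookupP ((a, b) :: r) p = b := by simp [lookupP, hpa]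
      rw [lookupP_not_mem r p (fun q hq => by have := hgt q hq; omega), hl, hpa]
      exact getD_swapAt_fst t a b hBa.1 (by omega)
    · by_cases hpb : p = b
      · have hl : lookupP ((a, b) :: r) p = a := by
          simp [lookupP, hpb, (by omega : ¬ (b = a))]
        rw [lookupP_not_mem r p (fun q hq => by have := hgt q hq; omega), hl, hpb]
        exact getD_swapAt_snd t a b hBa.2
      · have hcase := lookupP_cases r p
        have hne : lookupP r p ≠ a ∧ lookupP r p ≠ b := by
          rcases hcase with h | ⟨q, hq, h⟩
          · rw [h]; exact ⟨hpa, hpb⟩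
          · have := hgt q hq
            rcases h with h | h <;> rw [h] <;> omega
        rw [getD_swapAt_other t a b _ hne.1 hne.2]
        simp only [lookupP]
        rw [if_neg hpa, if_neg hpb]

-- ===== VERDICT (by name: the statement is the Claim_ definition above) =====
theorem fibonacci_swap_spec : Claim_equal_fibonacci_swap := by
  unfold Claim_equal_fibonacci_swap Spec_fibonacci_swap
  intro t _
  set n := t.length with hn
  set L := pairsB n 1 2 (n + 2) with hL
  have hIL : Inc 0 L := Inc_pairsB n (n + 2) 1 2 0 (by omega) (by omega)
  have hA : fibonacci_swap t = applySwaps t L := by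
    unfold fibonacci_swap
    rw [loopA_eq_core (t.length + 2) t [0, 1] 2 (by omega) rfl]
    have : ([0, 1] : List Nat).getD 0 0 = 0 := rfl
    rw [show ([0, 1] : List Nat).getD (2-2) 0 = 0 from rfl,
      show ([0, 1] : List Nat).getD (2-1) 0 = 1 from rfl,
      core_eq_pairs t.length (t.length + 2) t 0 1]
  have hB : fibonacci_swap_alt t = (List.range n).map (fun p => t.getD (lookupP L p) 0) := by
    show (List.range n).map (fun p => t.getD ((buildTarget n 1 2 PySem.Dict.empty (n + 2)).getD p p) 0) = _
    rw [buildTarget_eq n (n + 2) 1 2 PySem.Dict.empty]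
    apply List.map_congr_left
    intro p _
    rw [dict_lookup L 0 p hIL]
  rw [hA, hB, applySwaps_eq_map L t 0 hIL (bound_pairsB n (n + 2) 1 2 (by omega))]
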